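-- pv_equiv track=rewrite | github.com/yizhongzhang1989/ur_simulator | src/ur_sim_config/scripts/mjcf_postprocess.py | _inject_joint_friction
-- ===== SOURCE A (Python) =====
-- def _inject_joint_friction(xml: str) -> str:
--     """Add reduction-gear friction/damping to each joint (not present in URDF)."""
--     base_joints = ('shoulder_pan_joint', 'shoulder_lift_joint', 'elbow_joint')
--     wrist_joints = ('wrist_1_joint', 'wrist_2_joint', 'wrist_3_joint')
--     for j in base_joints:
--         xml = xml.replace(
--             f'joint name="{j}"',
--             f'joint name="{j}" frictionloss="5" damping="10"',
--         )
--     for j in wrist_joints: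
--         xml = xml.replace(
--             f'joint name="{j}"',
--             f'joint name="{j}" frictionloss="1" damping="3"',
--         )
--     return xml
-- ===== SOURCE B (Python) =====
-- def _inject_joint_friction(xml: str) -> str:
--     """Add reduction-gear friction/damping to each joint (not present in URDF)."""
--     inserts = {}
--     for j in ('shoulder_pan_joint', 'shoulder_lift_joint', 'elbow_joint'):
--         inserts[f'joint name="{j}"'] = ' frictionloss="5" damping="10"'
--     for j in ('wrist_1_joint', 'wrist_2_joint', 'wrist_3_joint'):
--         inserts[f'joint name="{j}"'] = ' frictionloss="1" damping="3"'
--     pieces = []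
--     i = 0
--     while i < len(xml):
--         for tag, ins in inserts.items():
--             if xml.startswith(tag, i):
--                 pieces.append(tag + ins)
--                 i += len(tag)
--                 break
--         else:
--             pieces.append(xml[i])
--             i += 1
--     return ''.join(pieces)
-- ===== Notes on version B (the rewrite author's own statement) =====
-- stated objective: alternative
-- what changed: A makes six sequential full-string str.replace passes (one per joint name); B builds a tag->attributes dict once and makes a single left-to-right scan over the XML, emitting each tag with its attributes appended and copying every other character unchanged.
import Mathlib
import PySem

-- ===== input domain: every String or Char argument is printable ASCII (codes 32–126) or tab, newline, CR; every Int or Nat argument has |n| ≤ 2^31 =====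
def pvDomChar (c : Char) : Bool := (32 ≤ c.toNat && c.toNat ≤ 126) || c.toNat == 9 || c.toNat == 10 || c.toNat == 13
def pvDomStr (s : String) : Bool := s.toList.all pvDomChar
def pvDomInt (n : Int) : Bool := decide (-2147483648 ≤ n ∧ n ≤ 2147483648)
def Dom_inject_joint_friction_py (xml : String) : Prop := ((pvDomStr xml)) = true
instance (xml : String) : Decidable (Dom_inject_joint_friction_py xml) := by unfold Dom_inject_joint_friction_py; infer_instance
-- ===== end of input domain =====

-- B replaces A's six sequential full-string `str.replace` passes by ONE left-to-right scan
-- with a tag→attributes table (objective: alternative single-pass algorithm, same result).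

-- ===== PORT A =====
-- literal transliteration of A: two tuples of joint names, a replace per name, threaded through xml
def inject_joint_friction_py (xml : String) : String :=
  let base_joints := ["shoulder_pan_joint", "shoulder_lift_joint", "elbow_joint"]
  let wrist_joints := ["wrist_1_joint", "wrist_2_joint", "wrist_3_joint"]
  let xml1 := base_joints.foldl (fun x j =>
    PySem.Str.replace x ("joint name=\"" ++ j ++ "\"")
      ("joint name=\"" ++ j ++ "\" frictionloss=\"5\" damping=\"10\"")) xml
  wrist_joints.foldl (fun x j =>
    PySem.Str.replace x ("joint name=\"" ++ j ++ "\"")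
      ("joint name=\"" ++ j ++ "\" frictionloss=\"1\" damping=\"3\"")) xml1

-- ===== PORT B =====
-- the table Source B builds: full tag → text inserted after it
def altTable : List (List Char × List Char) :=
  [ ("joint name=\"shoulder_pan_joint\"".toList,  " frictionloss=\"5\" damping=\"10\"".toList),
    ("joint name=\"shoulder_lift_joint\"".toList, " frictionloss=\"5\" damping=\"10\"".toList),
    ("joint name=\"elbow_joint\"".toList,         " frictionloss=\"5\" damping=\"10\"".toList),
    ("joint name=\"wrist_1_joint\"".toList,       " frictionloss=\"1\" damping=\"3\"".toList),
    ("joint name=\"wrist_2_joint\"".toList,       " frictionloss=\"1\" damping=\"3\"".toList),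
    ("joint name=\"wrist_3_joint\"".toList,       " frictionloss=\"1\" damping=\"3\"".toList) ]

theorem altTable_keys_ne_nil : ∀ p ∈ altTable, p.1 ≠ [] := by decide

-- Source B's while-loop: at each position try the table's tags (xml.startswith(tag, i)); on a hit
-- emit tag ++ insert and jump past the tag, otherwise emit the character and move on
def altGo (s : List Char) : List Char :=
  match s with
  | [] => []
  | c :: t =>
    match h : altTable.find? (fun p => p.1.isPrefixOf (c :: t)) with
    | some p => p.1 ++ p.2 ++ altGo ((c :: t).drop p.1.length)
    | none => c :: altGo t
termination_by s.length
decreasing_by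
  · have hmem := List.mem_of_find?_eq_some h
    have := altTable_keys_ne_nil p hmem
    have : 0 < p.1.length := List.length_pos_iff.mpr this
    simp [List.length_drop]; omega
  · simp

def inject_joint_friction_py_alt (xml : String) : String :=
  String.ofList (altGo xml.toList)

-- ===== PRECONDITION & SPEC =====
def Spec_inject_joint_friction_py (xml : String) (out : String) : Prop := out = inject_joint_friction_py_alt xml
instance (xml : String) (out : String) : Decidable (Spec_inject_joint_friction_py xml out) := by unfold Spec_inject_joint_friction_py; infer_instance

-- ===== CLAIM (what is proved, stated in full; the proofs are below) =====
def Claim_equal_inject_joint_friction_py : Prop := ∀ (xml : String), Dom_inject_joint_friction_py xml → Spec_inject_joint_friction_py xml (inject_joint_friction_py xml)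

-- ===== LEMMAS AND PROOFS =====

-- clean recursion equivalent to Python str.replace for a nonempty pattern
def repl (old new : List Char) : List Char → List Char
  | [] => []
  | c :: t =>
    if h : old ≠ [] ∧ old.isPrefixOf (c :: t) then
      new ++ repl old new (List.drop old.length (c :: t))
    else c :: repl old new t
termination_by l => l.length
decreasing_by
  · have : 0 < old.length := List.length_pos_iff.mpr h.1
    simp [List.length_drop]; omega
  · simp

theorem repl_nil (old new : List Char) : repl old new [] = [] := by rw [repl]

theorem repl_cons_pos (old new : List Char) (c : Char) (t : List Char)
    (hk : old ≠ []) (hp : old <+: (c :: t)) :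
    repl old new (c :: t) = new ++ repl old new (List.drop old.length (c :: t)) := by
  rw [repl, dif_pos ⟨hk, List.isPrefixOf_iff_prefix.mpr hp⟩]

theorem repl_cons_neg (old new : List Char) (c : Char) (t : List Char)
    (hp : ¬ old <+: (c :: t)) :
    repl old new (c :: t) = c :: repl old new t := by
  rw [repl, dif_neg (fun h => hp (List.isPrefixOf_iff_prefix.mp h.2))]

theorem repl_match (old new y : List Char) (hk : old ≠ []) :
    repl old new (old ++ y) = new ++ repl old new y := by
  cases old with
  | nil => exact absurd rfl hk
  | cons o ot =>
    rw [List.cons_append, repl_cons_pos _ _ _ _ hk (by rw [← List.cons_append]; exact List.prefix_append _ _)]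
    rw [← List.cons_append, List.drop_left]

-- "the pattern k neither occurs inside u nor does a suffix of u start an occurrence of k"
def skipCond (k u : List Char) : Bool :=
  (List.range u.length).all (fun p => !(k.isPrefixOf (u.drop p)) && !((u.drop p).isPrefixOf k))

theorem skipCond_spec (k u : List Char) (h : skipCond k u = true) (p : Nat) (hp : p < u.length) :
    ¬ k <+: u.drop p ∧ ¬ u.drop p <+: k := by
  simp only [skipCond, List.all_eq_true, List.mem_range, Bool.and_eq_true, Bool.not_eq_true',
    ← Bool.not_eq_true, List.isPrefixOf_iff_prefix] at h
  have := h p hp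
  tauto

theorem repl_skip (k new u : List Char) (hk : k ≠ []) (hu : skipCond k u = true) :
    ∀ l, repl k new (u ++ l) = u ++ repl k new l := by
  induction u with
  | nil => intro l; simp
  | cons c u' ih =>
    intro l
    have h0 := skipCond_spec k (c :: u') hu 0 (by simp)
    simp only [List.drop_zero] at h0
    have hnp : ¬ k <+: (c :: (u' ++ l)) := by
      intro hkp
      rcases List.prefix_or_prefix_of_prefix (l₃ := (c :: u') ++ l) hkp (List.prefix_append _ _) with h | h
      · exact h0.1 h
      · exact h0.2 h
    have hu' : skipCond k u' = true := by
      simp only [skipCond, List.all_eq_true, List.mem_range] at hu ⊢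
      intro p hp
      simpa using hu (p + 1) (by simpa using Nat.succ_lt_succ hp)
    rw [List.cons_append, repl_cons_neg _ _ _ _ hnp, ih hu' l]
    simp

-- no-match preservation: if a suffix q of k' does not start s, it does not start repl k (k++a) s,
-- provided k occurs nowhere inside k'
theorem nmp (k a k' : List Char) (hk : k ≠ [])
    (H : ∀ p, p < k'.length → ¬ k <+: k'.drop p) :
    ∀ n s, s.length ≤ n → ∀ p, p < k'.length → ¬ k'.drop p <+: s →
      ¬ k'.drop p <+: repl k (k ++ a) s := by
  intro n
  induction n with
  | zero =>
    intro s hs p hp hq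
    have : s = [] := List.length_eq_zero_iff.mp (Nat.le_zero.mp hs)
    subst this
    rw [repl_nil]
    intro hpre
    have : k'.drop p = [] := List.prefix_nil.mp hpre
    have : k'.length ≤ p := by
      have := congrArg List.length this
      simp [List.length_drop] at this
      omega
    omega
  | succ n ih =>
    intro s hs p hp hq
    cases s with
    | nil =>
      rw [repl_nil]
      intro hpre
      have : k'.drop p = [] := List.prefix_nil.mp hpre
      have : k'.length ≤ p := by
        have := congrArg List.length this
        simp [List.length_drop] at this
        omega
      omega
    | cons c t =>
      by_cases hm : k <+: (c :: t)
      · rw [repl_cons_pos _ _ _ _ hk hm]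
        intro hpre
        have hkpre : k <+: (k ++ a) ++ repl k (k ++ a) (List.drop k.length (c :: t)) :=
          (List.prefix_append k a).trans (List.prefix_append _ _)
        rcases List.prefix_or_prefix_of_prefix hpre hkpre with h | h
        · exact hq (h.trans hm)
        · exact H p hp h
      · rw [repl_cons_neg _ _ _ _ hm]
        intro hpre
        obtain ⟨qh, q', hqe⟩ : ∃ qh q', k'.drop p = qh :: q' := by
          cases hqq : k'.drop p with
          | nil =>
            have : k'.length ≤ p := by
              have := congrArg List.length hqq
              simp [List.length_drop] at this
              omega
            omega
          | cons x y => exact ⟨x, y, rfl⟩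
        rw [hqe, List.cons_prefix_cons] at hpre
        obtain ⟨rfl, hq'⟩ := hpre
        have hq'e : q' = k'.drop (p + 1) := by
          have : List.drop 1 (k'.drop p) = List.drop 1 (qh :: q') := by rw [hqe]
          simpa [List.drop_drop, Nat.add_comm] using this.symm
        by_cases hplt : p + 1 < k'.length
        · have hnq' : ¬ q' <+: t := by
            intro hc
            exact hq (by rw [hqe, List.cons_prefix_cons]; exact ⟨rfl, hc⟩)
          rw [hq'e] at hq' hnq'
          exact ih t (by simpa using Nat.lt_succ_iff.mp (by simpa using hs)) (p + 1) hplt hnq' hq'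
        · have : q' = [] := by
            rw [hq'e, List.drop_eq_nil_iff]
            omega
          subst this
          exact hq (by rw [hqe, List.cons_prefix_cons]; exact ⟨rfl, List.nil_prefix⟩)

-- sequential application of all replacements of a table (= A's six passes)
def applyAll (P : List (List Char × List Char)) (s : List Char) : List Char :=
  P.foldl (fun x p => repl p.1 (p.1 ++ p.2) x) s

theorem applyAll_nil (P : List (List Char × List Char)) : applyAll P [] = [] := by
  induction P with
  | nil => rfl
  | cons p P' ih => simpa [applyAll, List.foldl, repl_nil] using ih

theorem applyAll_skip (P : List (List Char × List Char)) (u : List Char)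
    (hne : ∀ p ∈ P, p.1 ≠ [])
    (hsk : ∀ p ∈ P, skipCond p.1 u = true) :
    ∀ y, applyAll P (u ++ y) = u ++ applyAll P y := by
  induction P with
  | nil => intro y; rfl
  | cons p0 P' ih =>
    intro y
    show applyAll P' (repl p0.1 (p0.1 ++ p0.2) (u ++ y)) = u ++ applyAll P' (repl p0.1 (p0.1 ++ p0.2) y)
    rw [repl_skip _ _ _ (hne p0 List.mem_cons_self) (hsk p0 List.mem_cons_self)]
    exact ih (fun p hp => hne p (List.mem_cons_of_mem _ hp))
      (fun p hp => hsk p (List.mem_cons_of_mem _ hp)) _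

theorem applyAll_head (P : List (List Char × List Char)) (c : Char) (t : List Char)
    (hne : ∀ p ∈ P, p.1 ≠ [])
    (hnd : (P.map (·.1)).Nodup)
    (hsk : ∀ p ∈ P, ∀ q ∈ P, p.1 ≠ q.1 → skipCond p.1 q.1 = true ∧ skipCond q.1 (p.1 ++ p.2) = true)
    (hno : ∀ p ∈ P, ¬ p.1 <+: (c :: t)) :
    applyAll P (c :: t) = c :: applyAll P t := by
  induction P generalizing t with
  | nil => rfl
  | cons p0 P' ih =>
    show applyAll P' (repl p0.1 (p0.1 ++ p0.2) (c :: t)) = c :: applyAll P' (repl p0.1 (p0.1 ++ p0.2) t)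
    rw [repl_cons_neg _ _ _ _ (hno p0 List.mem_cons_self)]
    have hnd' : (P'.map (·.1)).Nodup := (List.nodup_cons.mp hnd).2
    have hhead : ∀ q ∈ P', p0.1 ≠ q.1 := by
      intro q hqmem heq
      refine (List.nodup_cons.mp hnd).1 ?_
      show p0.1 ∈ P'.map (fun x => x.1)
      rw [heq]; exact List.mem_map_of_mem hqmem
    refine ih _ (fun p hp => hne p (List.mem_cons_of_mem _ hp)) hnd'
      (fun p hp q hq => hsk p (List.mem_cons_of_mem _ hp) q (List.mem_cons_of_mem _ hq)) ?_
    intro q hqmem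
    have hqnil := hne q (List.mem_cons_of_mem _ hqmem)
    rw [← repl_cons_neg _ _ _ _ (hno p0 List.mem_cons_self)]
    have H : ∀ p, p < q.1.length → ¬ p0.1 <+: q.1.drop p := by
      intro p hp
      exact (skipCond_spec _ _ ((hsk p0 List.mem_cons_self q (List.mem_cons_of_mem _ hqmem) (hhead q hqmem)).1) p hp).1
    have := nmp p0.1 p0.2 q.1 (hne p0 List.mem_cons_self) H (c :: t).length (c :: t) le_rfl 0
      (by simpa using List.length_pos_iff.mpr hqnil)
    simpa using this (by simpa using hno q (List.mem_cons_of_mem _ hqmem))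

theorem applyAll_match (P : List (List Char × List Char)) (k a : List Char)
    (hne : ∀ p ∈ P, p.1 ≠ [])
    (hnd : (P.map (·.1)).Nodup)
    (hsk : ∀ p ∈ P, ∀ q ∈ P, p.1 ≠ q.1 → skipCond p.1 q.1 = true ∧ skipCond q.1 (p.1 ++ p.2) = true)
    (hmem : (k, a) ∈ P) :
    ∀ y, applyAll P (k ++ y) = k ++ a ++ applyAll P y := by
  induction P with
  | nil => cases hmem
  | cons p0 P' ih =>
    intro y
    have hk : k ≠ [] := hne (k, a) hmem
    rcases List.mem_cons.mp hmem with heq | hmem'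
    · -- head is (k, a)
      have hp0 : p0 = (k, a) := heq.symm
      subst hp0
      show applyAll P' (repl k (k ++ a) (k ++ y)) = k ++ a ++ applyAll P' (repl k (k ++ a) y)
      rw [repl_match _ _ _ hk]
      apply applyAll_skip P' (k ++ a) (fun p hp => hne p (List.mem_cons_of_mem _ hp))
      intro q hqmem
      have hqne : k ≠ q.1 := by
        intro heq2
        refine (List.nodup_cons.mp hnd).1 ?_
        show k ∈ P'.map (fun x => x.1)
        rw [heq2]; exact List.mem_map_of_mem hqmem
      exact ((hsk (k, a) List.mem_cons_self q (List.mem_cons_of_mem _ hqmem) hqne).2)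
    · -- head differs
      have hne0 : p0.1 ≠ k := by
        intro heq2
        refine (List.nodup_cons.mp hnd).1 ?_
        show p0.1 ∈ P'.map (fun x => x.1)
        rw [heq2]; exact List.mem_map_of_mem hmem'
      show applyAll P' (repl p0.1 (p0.1 ++ p0.2) (k ++ y)) = k ++ a ++ applyAll P' (repl p0.1 (p0.1 ++ p0.2) y)
      rw [repl_skip _ _ _ (hne p0 List.mem_cons_self)
        ((hsk p0 List.mem_cons_self (k, a) hmem hne0).1)]
      exact ih (fun p hp => hne p (List.mem_cons_of_mem _ hp)) (List.nodup_cons.mp hnd).2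
        (fun p hp q hq => hsk p (List.mem_cons_of_mem _ hp) q (List.mem_cons_of_mem _ hq)) hmem' _

-- the three finite facts about B's table, checked by the kernel
theorem altTable_nodup : (altTable.map (·.1)).Nodup := by decide

theorem altTable_skip : ∀ p ∈ altTable, ∀ q ∈ altTable, p.1 ≠ q.1 →
    skipCond p.1 q.1 = true ∧ skipCond q.1 (p.1 ++ p.2) = true := by decide

-- main equivalence on lists: A's six sequential passes = B's single scan
theorem applyAll_eq_altGo : ∀ n s, s.length ≤ n → applyAll altTable s = altGo s := by
  intro n
  induction n with
  | zero =>
    intro s hs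
    have : s = [] := List.length_eq_zero_iff.mp (Nat.le_zero.mp hs)
    subst this
    rw [applyAll_nil, altGo]
  | succ n ih =>
    intro s hs
    cases s with
    | nil => rw [applyAll_nil, altGo]
    | cons c t =>
      rcases h : altTable.find? (fun p => p.1.isPrefixOf (c :: t)) with _ | pr
      · have hno : ∀ p ∈ altTable, ¬ p.1 <+: (c :: t) := by
          intro p hp hc
          have := List.find?_eq_none.mp h p hp
          simp [List.isPrefixOf_iff_prefix] at this
          exact this hc
        rw [applyAll_head altTable c t altTable_keys_ne_nil altTable_nodup altTable_skip hno,
          ih t (by simpa using Nat.lt_succ_iff.mp (by simpa using hs))]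
        rw [altGo, h]
      · have hmem := List.mem_of_find?_eq_some h
        have hpre : pr.1 <+: (c :: t) := by
          have := List.find?_some h
          simpa [List.isPrefixOf_iff_prefix] using this
        obtain ⟨y, hy⟩ := hpre
        have hk : pr.1 ≠ [] := altTable_keys_ne_nil pr hmem
        have hylen : y.length ≤ n := by
          have := congrArg List.length hy
          have hkl : 0 < pr.1.length := List.length_pos_iff.mpr hk
          simp [List.length_append] at this
          simp at hs
          omega
        rw [altGo, h]
        show applyAll altTable (c :: t) = pr.1 ++ pr.2 ++ altGo (List.drop pr.1.length (c :: t))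
        have hdrop : (c :: t).drop pr.1.length = y := by rw [← hy, List.drop_left]
        rw [hdrop, ← ih y hylen, ← hy,
          applyAll_match altTable pr.1 pr.2 altTable_keys_ne_nil altTable_nodup altTable_skip
            (by simpa using hmem) y]

-- bridge: PySem's str.replace equals the clean recursion (nonempty pattern)
theorem go_eq_repl (old new : List Char) (hk : old ≠ []) :
    ∀ fuel l acc, l.length ≤ fuel →
      PySem.Chars.replace.go old new fuel l acc = acc.reverse ++ repl old new l := by
  intro fuel
  induction fuel with
  | zero =>
    intro l acc hl
    have : l = [] := List.length_eq_zero_iff.mp (Nat.le_zero.mp hl)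
    subst this
    rw [PySem.Chars.replace.go, repl_nil]
  | succ n ih =>
    intro l acc hl
    cases l with
    | nil =>
      rw [PySem.Chars.replace.go, repl_nil]
      simp
      omega
    | cons c t =>
      have hkl : 0 < old.length := List.length_pos_iff.mpr hk
      rw [PySem.Chars.replace.go]
      by_cases hp : old.isPrefixOf (c :: t)
      · have hlen : (List.drop old.length (c :: t)).length ≤ n := by
          simp only [List.length_drop, List.length_cons]
          simp only [List.length_cons] at hl
          omega
        simp only [hp, if_true]
        rw [ih _ _ hlen, repl_cons_pos _ _ _ _ hk (List.isPrefixOf_iff_prefix.mp hp)]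
        simp
      · have hp' : old.isPrefixOf (c :: t) = false := by
          cases hb : old.isPrefixOf (c :: t) with
          | false => rfl
          | true => exact absurd hb hp
        simp only [hp', Bool.false_eq_true, if_false]
        have hlen : t.length ≤ n := by
          simp only [List.length_cons] at hl
          omega
        rw [ih _ _ hlen, repl_cons_neg _ _ _ _ (fun hc => hp (List.isPrefixOf_iff_prefix.mpr hc))]
        simp

theorem str_replace_eq (s o n : String) (h : o.toList ≠ []) :
    PySem.Str.replace s o n = String.ofList (repl o.toList n.toList s.toList) := by
  rw [PySem.Str.replace, PySem.Chars.replace]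
  have : o.toList.isEmpty = false := by simpa [List.isEmpty_iff] using h
  rw [this]
  simp only [Bool.false_eq_true, if_false]
  rw [go_eq_repl _ _ h _ _ _ le_rfl]
  simp

-- A's port, rewritten through the bridge, is applyAll of B's table
theorem a_eq_applyAll (xml : String) :
    inject_joint_friction_py xml = String.ofList (applyAll altTable xml.toList) := by
  simp only [inject_joint_friction_py, List.foldl, applyAll, altTable]
  rw [str_replace_eq _ _ _ (by decide), str_replace_eq _ _ _ (by decide),
    str_replace_eq _ _ _ (by decide), str_replace_eq _ _ _ (by decide),
    str_replace_eq _ _ _ (by decide), str_replace_eq _ _ _ (by decide)]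
  simp only [String.toList_ofList]
  rfl

-- ===== VERDICT (by name: the statement is the Claim_ definition above) =====
theorem inject_joint_friction_py_spec : Claim_equal_inject_joint_friction_py := by
  intro xml _
  show inject_joint_friction_py xml = inject_joint_friction_py_alt xml
  rw [a_eq_applyAll, inject_joint_friction_py_alt,
    applyAll_eq_altGo xml.toList.length xml.toList le_rfl]
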